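-- pv_equiv track=rewrite | github.com/Choi-89/OCR | src/ocr_project/stage6_deployment/confidence_ui.py | confidence_summary
-- ===== SOURCE A (Python) =====
-- from collections import Counter
-- from typing import Any
--
-- def confidence_summary(results: list[dict[str, Any]]) -> dict[str, int]:
--     counts = Counter(item.get("confidence_level", "low") for item in results)
--     mid = counts.get("mid", 0)
--     low = counts.get("low", 0)
--     return {
--         "total_cells": len(results),
--         "high_confidence": counts.get("high", 0),
--         "mid_confidence": mid,
--         "low_confidence": low,
--         "review_required": mid + low,
--     }
-- ===== SOURCE B (Python) =====
-- def confidence_summary(results: list[dict[str, object]]) -> dict[str, int]: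
--     def tally(items):
--         if not items:
--             return (0, 0, 0)
--         h, m, l = tally(items[1:])
--         lvl = items[0].get("confidence_level", "low")
--         if lvl == "high":
--             return (h + 1, m, l)
--         if lvl == "mid":
--             return (h, m + 1, l)
--         if lvl == "low":
--             return (h, m, l + 1)
--         return (h, m, l)
--
--     high, mid, low = tally(results)
--     return {
--         "total_cells": len(results),
--         "high_confidence": high,
--         "mid_confidence": mid,
--         "low_confidence": low,
--         "review_required": mid + low,
--     }
-- ===== Notes on version B (the rewrite author's own statement) =====
-- stated objective: alternative
-- what changed: Replaces A's Counter table with a structural recursion over the list that threads a (high, mid, low) triple accumulator and classifies each item with an if-chain; no dictionary of counts is ever built.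
import Mathlib
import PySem

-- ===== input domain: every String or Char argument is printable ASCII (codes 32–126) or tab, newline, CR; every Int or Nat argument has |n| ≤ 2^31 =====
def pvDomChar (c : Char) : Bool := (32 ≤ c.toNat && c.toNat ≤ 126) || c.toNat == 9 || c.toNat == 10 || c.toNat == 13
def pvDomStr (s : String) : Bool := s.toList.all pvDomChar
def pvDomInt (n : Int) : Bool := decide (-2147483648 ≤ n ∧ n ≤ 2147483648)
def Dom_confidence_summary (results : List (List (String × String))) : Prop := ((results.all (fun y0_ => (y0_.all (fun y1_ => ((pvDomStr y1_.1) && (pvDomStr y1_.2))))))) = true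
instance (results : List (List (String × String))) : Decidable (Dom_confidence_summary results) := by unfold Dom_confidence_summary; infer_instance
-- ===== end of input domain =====

-- B replaces A's Counter table by a structural recursion threading a (high, mid, low) triple; same O(n) cost, no count dictionary.

-- ===== PORT A =====
-- item.get("confidence_level", "low")
def pvLevelA (item : List (String × String)) : String :=
  (PySem.Dict.ofList item).getD "confidence_level" "low"

def confidence_summary (results : List (List (String × String))) : List (String × Int) :=
  let counts := PySem.Dict.counter (results.map pvLevelA)
  let mid := counts.getD "mid" 0
  let low := counts.getD "low" 0
  [("total_cells", (results.length : Int)),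
   ("high_confidence", counts.getD "high" 0),
   ("mid_confidence", mid),
   ("low_confidence", low),
   ("review_required", mid + low)]

-- ===== PORT B =====
-- tally(items): recursion on the list, accumulating the (high, mid, low) triple
def pvTally : List (List (String × String)) → Int × Int × Int
  | [] => (0, 0, 0)
  | item :: rest =>
    let t := pvTally rest
    let lvl := (PySem.Dict.ofList item).getD "confidence_level" "low"
    if lvl = "high" then (t.1 + 1, t.2.1, t.2.2)
    else if lvl = "mid" then (t.1, t.2.1 + 1, t.2.2)
    else if lvl = "low" then (t.1, t.2.1, t.2.2 + 1)
    else t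

def confidence_summary_alt (results : List (List (String × String))) : List (String × Int) :=
  let t := pvTally results
  [("total_cells", (results.length : Int)),
   ("high_confidence", t.1),
   ("mid_confidence", t.2.1),
   ("low_confidence", t.2.2),
   ("review_required", t.2.1 + t.2.2)]

-- ===== PRECONDITION & SPEC =====
def Spec_confidence_summary (results : List (List (String × String))) (out : List (String × Int)) : Prop := out = confidence_summary_alt results
instance (results : List (List (String × String))) (out : List (String × Int)) : Decidable (Spec_confidence_summary results out) := by unfold Spec_confidence_summary; infer_instance

-- ===== CLAIM (what is proved, stated in full; the proofs are below) =====
def Claim_equal_confidence_summary : Prop := ∀ (results : List (List (String × String))), Dom_confidence_summary results → Spec_confidence_summary results (confidence_summary results)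

-- ===== LEMMAS AND PROOFS =====

-- B's recursive triple is exactly the three occurrence counts of the mapped levels.
theorem pvTally_eq (results : List (List (String × String))) :
    pvTally results =
      (((results.map pvLevelA).count "high" : Int),
       ((results.map pvLevelA).count "mid" : Int),
       ((results.map pvLevelA).count "low" : Int)) := by
  induction results with
  | nil => simp [pvTally]
  | cons x rest ih =>
      simp only [pvTally, ih, List.map_cons, List.count_cons, pvLevelA]
      by_cases h1 : (PySem.Dict.ofList x).getD "confidence_level" "low" = "high"
      · simp [h1]
      · by_cases h2 : (PySem.Dict.ofList x).getD "confidence_level" "low" = "mid"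
        · simp [h2]
        · by_cases h3 : (PySem.Dict.ofList x).getD "confidence_level" "low" = "low"
          · simp [h3]
          · simp [h1, h2, h3]

-- ===== VERDICT (by name: the statement is the Claim_ definition above) =====
theorem confidence_summary_spec : Claim_equal_confidence_summary := by
  intro results _
  unfold Spec_confidence_summary confidence_summary confidence_summary_alt
  simp [pvTally_eq, PySem.Dict.getD_counter]
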